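-- pv_equiv track=rewrite | github.com/PyICe-ADI/PyICe | PyICe/lab_utils/swap_endian.py | swap_endian
-- ===== SOURCE A (Python) =====
-- def swap_endian(word, elementCount, elementSize=8):
--     '''reverse endianness of multi-byte word
--     elementCount is number of bytes, or other atomic memory block if not of elementSize 8 bits
--
--     to reverse bit order, set elementCount to the number of bits and set elementSize to 1.'''
--     assert word < 2**(elementSize*elementCount)
--     assert word >= 0
--     reversed = 0x00
--     mask = 2**elementSize-1
--     while elementCount > 0:
--         reversed ^= (word & mask) << (elementSize*(elementCount-1))
--         word = word >> elementSize
--         elementCount -= 1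
--     return reversed
-- ===== SOURCE B (Python) =====
-- def swap_endian(word, elementCount, elementSize=8):
--     '''reverse endianness of multi-byte word (two-pass: extract elements, then refold in reverse)'''
--     assert word < 2**(elementSize*elementCount)
--     assert word >= 0
--     elements = []
--     w = word
--     for _ in range(elementCount):
--         elements.append(w & ((1 << elementSize) - 1))
--         w >>= elementSize
--     result = 0
--     for element in elements:
--         result = (result << elementSize) | element
--     return result
-- ===== Notes on version B (the rewrite author's own statement) =====
-- stated objective: alternative
-- what changed: Replaces A's single pass that XORs each masked chunk into its final position computed by elementSize*(elementCount-1) with a two-pass extract-then-fold: first decompose the word into a low-to-high list of elements, then recombine them with a shifting accumulator (result = (result << elementSize) | element), which reverses the element order without any positional arithmetic.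
import Mathlib
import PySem

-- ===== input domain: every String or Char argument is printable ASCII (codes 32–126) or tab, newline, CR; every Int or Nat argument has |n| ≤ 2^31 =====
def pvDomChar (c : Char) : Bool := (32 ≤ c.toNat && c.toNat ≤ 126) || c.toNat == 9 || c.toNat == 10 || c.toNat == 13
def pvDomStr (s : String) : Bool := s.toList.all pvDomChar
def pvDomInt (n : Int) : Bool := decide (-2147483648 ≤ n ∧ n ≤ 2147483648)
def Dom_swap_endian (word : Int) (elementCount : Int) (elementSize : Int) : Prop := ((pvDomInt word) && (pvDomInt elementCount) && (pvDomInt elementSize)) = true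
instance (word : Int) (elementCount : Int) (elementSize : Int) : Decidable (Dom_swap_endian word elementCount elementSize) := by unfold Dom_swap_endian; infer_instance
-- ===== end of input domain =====

-- B replaces A's single positional-XOR pass by a two-pass extract-then-fold decomposition (objective: alternative, same cost).

-- ===== PORT A =====
-- while elementCount > 0: reversed ^= (word & mask) << (elementSize*(elementCount-1)); word >>= elementSize; elementCount -= 1
def swapEndianLoop (elementSize mask : Int) (word elementCount reversed : Int) : Int :=
  if 0 < elementCount then
    swapEndianLoop elementSize mask (word >>> elementSize.toNat) (elementCount - 1)
      (PySem.Int.bxor reversed ((PySem.Int.band word mask) <<< (elementSize * (elementCount - 1)).toNat))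
  else reversed
termination_by elementCount.toNat

def swap_endian (word : Int) (elementCount : Int) (elementSize : Int) : Int :=
  swapEndianLoop elementSize (2 ^ elementSize.toNat - 1) word elementCount 0

-- ===== PORT B =====
-- first pass: for _ in range(elementCount): elements.append(w & ((1 << elementSize) - 1)); w >>= elementSize
def swapEndianElements (elementSize : Int) : Int → Nat → List Int
  | _, 0 => []
  | w, n+1 => (PySem.Int.band w ((1 : Int) <<< elementSize.toNat - 1)) ::
      swapEndianElements elementSize (w >>> elementSize.toNat) n

-- second pass: for element in elements: result = (result << elementSize) | element
def swapEndianCombine (elementSize : Int) : Int → List Int → Int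
  | result, [] => result
  | result, e :: rest => swapEndianCombine elementSize (PySem.Int.bor (result <<< elementSize.toNat) e) rest

def swap_endian_alt (word : Int) (elementCount : Int) (elementSize : Int) : Int :=
  swapEndianCombine elementSize 0 (swapEndianElements elementSize word elementCount.toNat)

-- ===== PRECONDITION & SPEC =====
-- Pre_ = exactly where Python A returns: its two asserts (note 2**(elementSize*elementCount) is a
-- fraction in (0,1] when the exponent is negative, so the first assert then forces word = 0), plus
-- elementSize ≥ 0 whenever the loop runs (otherwise `word & mask` with a float mask raises TypeError).
-- (for 0 ≤ word, `bitLength word ≤ N` is exactly `word < 2**N`, stated this way so Pre_ is cheap to decide)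
def Pre_swap_endian (word : Int) (elementCount : Int) (elementSize : Int) : Prop :=
  0 ≤ word ∧
  (0 ≤ elementSize * elementCount → PySem.Int.bitLength word ≤ (elementSize * elementCount).toNat) ∧
  (elementSize * elementCount < 0 → word = 0) ∧
  (0 < elementCount → 0 ≤ elementSize)
instance (word : Int) (elementCount : Int) (elementSize : Int) : Decidable (Pre_swap_endian word elementCount elementSize) := by unfold Pre_swap_endian; infer_instance

def pvWitness_swap_endian : Int × Int × Int := (258, 2, 8)

def Spec_swap_endian (word : Int) (elementCount : Int) (elementSize : Int) (out : Int) : Prop := out = swap_endian_alt word elementCount elementSize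
instance (word : Int) (elementCount : Int) (elementSize : Int) (out : Int) : Decidable (Spec_swap_endian word elementCount elementSize out) := by unfold Spec_swap_endian; infer_instance

-- ===== CLAIM (what is proved, stated in full; the proofs are below) =====
def Claim_equal_swap_endian : Prop := ∀ (word : Int) (elementCount : Int) (elementSize : Int), Dom_swap_endian word elementCount elementSize → Pre_swap_endian word elementCount elementSize → Spec_swap_endian word elementCount elementSize (swap_endian word elementCount elementSize)

-- ===== LEMMAS AND PROOFS =====

-- bit-disjoint xor is addition
theorem pv_xor_of_dvd {i : Nat} (a b : Nat) (ha : 2^i ∣ a) (hb : b < 2^i) : a ^^^ b = a + b := by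
  obtain ⟨q, rfl⟩ := ha
  have hor : 2^i * q ^^^ b = 2^i * q ||| b := by
    apply Nat.eq_of_testBit_eq
    intro j
    simp only [Nat.testBit_xor, Nat.testBit_or, Nat.testBit_two_pow_mul]
    by_cases h : i ≤ j
    · have : b.testBit j = false :=
        Nat.testBit_lt_two_pow (lt_of_lt_of_le hb (Nat.pow_le_pow_right (by omega) h))
      simp [this]
    · simp [h]
  rw [hor, ← Nat.two_pow_add_eq_or_of_lt hb]

-- common arithmetic model of the reversed word, on Nat
def pvVal (k : Nat) : Nat → Nat → Nat
  | 0, _ => 0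
  | c+1, w => (w % 2^k) * 2^(k*c) + pvVal k c (w / 2^k)

theorem pv_loopA_eq (k : Nat) : ∀ (c w r : Nat), 2^(k*c) ∣ r →
    swapEndianLoop (k : Int) ((2:Int)^k - 1) (w : Int) (c : Int) (r : Int)
      = ((r + pvVal k c w : Nat) : Int) := by
  intro c
  induction c with
  | zero => intro w r _; rw [swapEndianLoop]; simp [pvVal]
  | succ c ih =>
    intro w r hr
    rw [swapEndianLoop]
    have hpos : (0:Int) < ((c+1 : Nat) : Int) := by exact_mod_cast Nat.succ_pos c
    rw [if_pos hpos]
    have hmask : ((2:Int)^k - 1) = ((2^k - 1 : Nat) : Int) := by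
      have : (1:Nat) ≤ 2^k := Nat.one_le_two_pow
      push_cast [this]; ring
    have hsh : ((k : Int) * (((c+1 : Nat) : Int) - 1)).toNat = k * c := by
      have : ((k : Int) * (((c+1 : Nat) : Int) - 1)) = ((k * c : Nat) : Int) := by push_cast; ring
      rw [this, Int.toNat_natCast]
    have hband : PySem.Int.band (w : Int) ((2:Int)^k - 1) = ((w % 2^k : Nat) : Int) := by
      rw [hmask, PySem.Int.band_natCast, Nat.and_two_pow_sub_one_eq_mod]
    have hlt : (w % 2^k) * 2^(k*c) < 2^(k*(c+1)) := by
      have h1 : w % 2^k < 2^k := Nat.mod_lt _ (Nat.two_pow_pos k)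
      calc (w % 2^k) * 2^(k*c) < 2^k * 2^(k*c) :=
            (Nat.mul_lt_mul_right (Nat.two_pow_pos _)).mpr h1
        _ = 2^(k*(c+1)) := by rw [← pow_add]; congr 1; rw [Nat.mul_succ, Nat.add_comm]
    have hx : PySem.Int.bxor (r : Int) (((w % 2^k : Nat) : Int) <<< (k*c))
        = ((r + (w % 2^k) * 2^(k*c) : Nat) : Int) := by
      rw [show (((w % 2^k : Nat) : Int) <<< (k*c)) = (((w % 2^k) <<< (k*c) : Nat) : Int) from
            (Int.natCast_shiftLeft _ _).symm,
          PySem.Int.bxor_natCast, Nat.shiftLeft_eq]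
      exact congrArg _ (pv_xor_of_dvd r _ hr hlt)
    have hword : ((w : Int) >>> ((k : Int)).toNat) = ((w / 2^k : Nat) : Int) := by
      rw [Int.toNat_natCast, ← Nat.shiftRight_eq_div_pow, Int.natCast_shiftRight]
    have hcount : (((c+1 : Nat) : Int) - 1) = ((c : Nat) : Int) := by push_cast; ring
    rw [hsh, hband, hx, hword, hcount]
    rw [ih (w / 2^k) (r + (w % 2^k) * 2^(k*c))
        (dvd_add (dvd_trans (pow_dvd_pow 2 (Nat.mul_le_mul_left k (Nat.le_succ c))) hr)
          (dvd_mul_left _ _))]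
    congr 1
    simp only [pvVal]
    ring

theorem pv_combineB_eq (k : Nat) : ∀ (c w r : Nat),
    swapEndianCombine (k : Int) (r : Int) (swapEndianElements (k : Int) (w : Int) c)
      = ((r * 2^(k*c) + pvVal k c w : Nat) : Int) := by
  intro c
  induction c with
  | zero => intro w r; simp [swapEndianElements, swapEndianCombine, pvVal]
  | succ c ih =>
    intro w r
    rw [swapEndianElements, swapEndianCombine]
    have hband : PySem.Int.band (w : Int) ((1:Int) <<< ((k:Int)).toNat - 1)
        = ((w % 2^k : Nat) : Int) := by
      have h1 : ((1:Int) <<< ((k:Int)).toNat - 1) = ((2^k - 1 : Nat) : Int) := by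
        rw [Int.toNat_natCast,
            show (1:Int) <<< k = (((1 <<< k : Nat)) : Int) by rw [Int.natCast_shiftLeft]; norm_num]
        have : (1:Nat) ≤ 2^k := Nat.one_le_two_pow
        push_cast [Nat.shiftLeft_eq, this]; ring
      rw [h1, PySem.Int.band_natCast, Nat.and_two_pow_sub_one_eq_mod]
    have hbor : PySem.Int.bor ((r : Int) <<< ((k:Int)).toNat) ((w % 2^k : Nat) : Int)
        = ((r * 2^k + w % 2^k : Nat) : Int) := by
      rw [Int.toNat_natCast,
          show ((r:Int) <<< k) = (((r <<< k : Nat)) : Int) from (Int.natCast_shiftLeft r k).symm,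
          PySem.Int.bor_natCast, Nat.shiftLeft_eq]
      have := Nat.two_pow_add_eq_or_of_lt (i := k) (Nat.mod_lt w (Nat.two_pow_pos k)) r
      rw [Nat.mul_comm] at this
      rw [← this]
    have hword : ((w : Int) >>> ((k : Int)).toNat) = ((w / 2^k : Nat) : Int) := by
      rw [Int.toNat_natCast, ← Nat.shiftRight_eq_div_pow, Int.natCast_shiftRight]
    rw [hband, hbor, hword, ih (w / 2^k) (r * 2^k + w % 2^k)]
    congr 1
    simp only [pvVal, Nat.mul_succ, pow_add]
    ring

-- ===== VERDICT (by name: the statement is the Claim_ definition above) =====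
theorem swap_endian_spec : Claim_equal_swap_endian := by
  intro word elementCount elementSize _ hpre
  obtain ⟨hw, _, _, hes⟩ := hpre
  unfold Spec_swap_endian swap_endian swap_endian_alt
  by_cases hec : 0 < elementCount
  · obtain ⟨w, rfl⟩ := Int.eq_ofNat_of_zero_le hw
    obtain ⟨k, rfl⟩ := Int.eq_ofNat_of_zero_le (hes hec)
    obtain ⟨c, rfl⟩ := Int.eq_ofNat_of_zero_le (le_of_lt hec)
    have hm : (2:Int) ^ ((k:Int)).toNat - 1 = (2:Int)^k - 1 := by rw [Int.toNat_natCast]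
    have hA := pv_loopA_eq k c w 0 (dvd_zero _)
    have hB := pv_combineB_eq k c w 0
    push_cast at hA hB
    rw [hm, hA, Int.toNat_natCast, hB]; ring
  · have h0 : elementCount.toNat = 0 := by omega
    rw [swapEndianLoop, if_neg hec, h0]
    simp [swapEndianElements, swapEndianCombine]
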